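-- pv_equiv track=rewrite | github.com/TheRoomMapp/App-Name-Pending | Dictionary Version.py | bookings_by_day
-- ===== SOURCE A (Python) =====
-- def bookings_by_day(two_letter_weekday, biglist):
--     '''
--     Based on your choice of day, shows what rooms are occupied by half-hour time slots
--     '''
--     lstarttimes=['8:30', '9:00', '9:30', '10:00', '10:30', '11:00', '11:30', '12:00', '12:30', '13:00', '13:30', '14:00',
--             '14:30', '15:00', '15:30', '16:00', '16:30', '17:00', '17:30', '18:00', '18:30', '19:00', '19:30', '20:00', '20:30']
--     lendtimes=['8:20', '8:50', '9:20', '9:50', '10:20', '10:50', '11:20', '11:50', '12:20', '12:50', '13:20', '13:50', '14:20',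
--                '14:50', '15:20', '15:50', '16:20', '16:50', '17:20', '17:50', '18:20', '18:50', '19:20', '19:50', '20:20']
--     dfull_by_time={'8:30':[], '9:00': [], '9:30': [], '10:00': [], '10:30': [], '11:00': [], '11:30': [], '12:00': [],
--                    '12:30': [], '13:00': [], '13:30': [], '14:00': [], '14:30': [], '15:00': [], '15:30': [], '16:00': [],
--                    '16:30': [], '17:00': [], '17:30': [], '18:00': [], '18:30': [], '19:00': [], '19:30': [], '20:00': []}
--     for dic in biglist:
--         if dic['days']==two_letter_weekday:
--             startfound="nah"
--             endfound="nope"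
--             check=0
--             while startfound=="nah" and check<len(lstarttimes):
--                 if dic['startTime']==lstarttimes[check]:
--                     startfound=lstarttimes[check]
--                 else: check+=1
--             checkend=0
--             while endfound=="nope" and checkend<len(lendtimes):
--                 if dic['endTime']==lendtimes[checkend]:
--                     endfound=lendtimes[checkend]
--                     for index in range(check, checkend):
--                          dfull_by_time[lstarttimes[index]].append(dic['buildingCode']+" "+dic['roomNumber'])
--                 checkend+=1
--     return dfull_by_time
-- ===== SOURCE B (Python) =====
-- def bookings_by_day(two_letter_weekday, biglist):
--     '''
--     Based on your choice of day, shows what rooms are occupied by half-hour time slots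
--     '''
--     lstarttimes=['8:30', '9:00', '9:30', '10:00', '10:30', '11:00', '11:30', '12:00', '12:30', '13:00', '13:30', '14:00',
--             '14:30', '15:00', '15:30', '16:00', '16:30', '17:00', '17:30', '18:00', '18:30', '19:00', '19:30', '20:00', '20:30']
--     lendtimes=['8:20', '8:50', '9:20', '9:50', '10:20', '10:50', '11:20', '11:50', '12:20', '12:50', '13:20', '13:50', '14:20',
--                '14:50', '15:20', '15:50', '16:20', '16:50', '17:20', '17:50', '18:20', '18:50', '19:20', '19:50', '20:20']
--     sidx = {t: i for i, t in enumerate(lstarttimes)}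
--     eidx = {t: i for i, t in enumerate(lendtimes)}
--     out = {}
--     for i, slot in enumerate(lstarttimes[:24]):
--         out[slot] = [d['buildingCode'] + " " + d['roomNumber'] for d in biglist
--                      if d['days'] == two_letter_weekday
--                      and d['startTime'] in sidx and d['endTime'] in eidx
--                      and sidx[d['startTime']] <= i < eidx[d['endTime']]]
--     return out
-- ===== Notes on version B (the rewrite author's own statement) =====
-- stated objective: alternative
-- what changed: Replaced the booking-major pass (hand-written linear while-searches for the start/end indices plus an in-place fill of a range of dict slots) by a slot-major construction: two precomputed time->index maps and, for each of the 24 output slots, a list comprehension over the bookings selecting those active in that slot.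
import Mathlib
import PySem

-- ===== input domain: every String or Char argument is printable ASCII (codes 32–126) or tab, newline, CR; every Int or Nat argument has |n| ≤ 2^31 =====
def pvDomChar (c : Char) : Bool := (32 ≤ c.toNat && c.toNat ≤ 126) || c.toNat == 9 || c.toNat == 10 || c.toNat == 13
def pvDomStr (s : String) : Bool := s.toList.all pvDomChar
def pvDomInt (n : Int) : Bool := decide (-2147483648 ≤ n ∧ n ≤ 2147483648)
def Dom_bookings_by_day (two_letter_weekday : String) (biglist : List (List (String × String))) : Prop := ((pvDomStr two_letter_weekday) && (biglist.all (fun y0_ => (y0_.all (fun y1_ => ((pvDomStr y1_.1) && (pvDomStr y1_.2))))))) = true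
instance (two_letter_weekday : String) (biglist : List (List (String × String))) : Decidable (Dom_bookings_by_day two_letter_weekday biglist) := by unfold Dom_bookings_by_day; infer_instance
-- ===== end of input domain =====

-- B replaces A's booking-major pass (hand-written while-loop searches plus an in-place fill of a
-- range of dict slots) by precomputed time→index maps and a slot-major pass building each slot's
-- list with one comprehension over the bookings (objective: alternative decomposition).
-- Equality is about the RETURN value; neither program mutates its arguments.

-- ===== PORT A =====
def lstartA : List String := ["8:30", "9:00", "9:30", "10:00", "10:30", "11:00", "11:30", "12:00", "12:30", "13:00", "13:30", "14:00", "14:30", "15:00", "15:30", "16:00", "16:30", "17:00", "17:30", "18:00", "18:30", "19:00", "19:30", "20:00", "20:30"]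
def lendA : List String := ["8:20", "8:50", "9:20", "9:50", "10:20", "10:50", "11:20", "11:50", "12:20", "12:50", "13:20", "13:50", "14:20", "14:50", "15:20", "15:50", "16:20", "16:50", "17:20", "17:50", "18:20", "18:50", "19:20", "19:50", "20:20"]

-- the two while-loop linear searches: first index of t, or the list's length if absent
def scanIdx (t : String) : List String → Nat
  | [] => 0
  | x :: xs => if t == x then 0 else scanIdx t xs + 1

def scanIdx? (t : String) : List String → Option Nat
  | [] => none
  | x :: xs => if t == x then some 0 else (scanIdx? t xs).map (· + 1)

-- 'for index in range(check, checkend): dfull_by_time[lstarttimes[index]].append(code)'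
def fillA (code : String) (c j : Nat) (d : PySem.Dict String (List String)) : PySem.Dict String (List String) :=
  (List.range' c (j - c)).foldl (fun d idx => d.modify (lstartA.getD idx "") [] (· ++ [code])) d

def stepA (wd : String) (d : PySem.Dict String (List String)) (dic : List (String × String)) : PySem.Dict String (List String) :=
  if (PySem.Dict.mk dic).getD "days" "" == wd then
    match scanIdx? ((PySem.Dict.mk dic).getD "endTime" "") lendA with
    | some j =>
        fillA ((PySem.Dict.mk dic).getD "buildingCode" "" ++ " " ++ (PySem.Dict.mk dic).getD "roomNumber" "")
          (scanIdx ((PySem.Dict.mk dic).getD "startTime" "") lstartA) j d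
    | none => d
  else d

def initA : PySem.Dict String (List String) := PySem.Dict.ofList [("8:30", ([] : List String)), ("9:00", ([] : List String)), ("9:30", ([] : List String)), ("10:00", ([] : List String)), ("10:30", ([] : List String)), ("11:00", ([] : List String)), ("11:30", ([] : List String)), ("12:00", ([] : List String)), ("12:30", ([] : List String)), ("13:00", ([] : List String)), ("13:30", ([] : List String)), ("14:00", ([] : List String)), ("14:30", ([] : List String)), ("15:00", ([] : List String)), ("15:30", ([] : List String)), ("16:00", ([] : List String)), ("16:30", ([] : List String)), ("17:00", ([] : List String)), ("17:30", ([] : List String)), ("18:00", ([] : List String)), ("18:30", ([] : List String)), ("19:00", ([] : List String)), ("19:30", ([] : List String)), ("20:00", ([] : List String))]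

def bookings_by_day (two_letter_weekday : String) (biglist : List (List (String × String))) : List (String × List String) :=
  (biglist.foldl (stepA two_letter_weekday) initA).items

-- ===== PORT B =====
def lstartB : List String := ["8:30", "9:00", "9:30", "10:00", "10:30", "11:00", "11:30", "12:00", "12:30", "13:00", "13:30", "14:00", "14:30", "15:00", "15:30", "16:00", "16:30", "17:00", "17:30", "18:00", "18:30", "19:00", "19:30", "20:00", "20:30"]
def lendB : List String := ["8:20", "8:50", "9:20", "9:50", "10:20", "10:50", "11:20", "11:50", "12:20", "12:50", "13:20", "13:50", "14:20", "14:50", "15:20", "15:50", "16:20", "16:50", "17:20", "17:50", "18:20", "18:50", "19:20", "19:50", "20:20"]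

-- sidx = {t: i for i, t in enumerate(lstarttimes)}, eidx likewise
def sidxB : PySem.Dict String Int := PySem.Dict.ofList ((PySem.List.enumerate lstartB 0).map (fun p => (p.2, p.1)))
def eidxB : PySem.Dict String Int := PySem.Dict.ofList ((PySem.List.enumerate lendB 0).map (fun p => (p.2, p.1)))

-- the slot-i comprehension over the bookings
def occB (wd : String) (biglist : List (List (String × String))) (i : Int) : List String :=
  biglist.foldl (fun acc dic =>
    if (PySem.Dict.mk dic).getD "days" "" == wd then
      match sidxB.get? ((PySem.Dict.mk dic).getD "startTime" ""), eidxB.get? ((PySem.Dict.mk dic).getD "endTime" "") with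
      | some si, some ei =>
          if si ≤ i ∧ i < ei then
            acc ++ [(PySem.Dict.mk dic).getD "buildingCode" "" ++ " " ++ (PySem.Dict.mk dic).getD "roomNumber" ""]
          else acc
      | _, _ => acc
    else acc) []

def bookings_by_day_alt (two_letter_weekday : String) (biglist : List (List (String × String))) : List (String × List String) :=
  ((PySem.List.enumerate (lstartB.take 24) 0).foldl
      (fun d p => d.insert p.2 (occB two_letter_weekday biglist p.1)) PySem.Dict.empty).items

-- ===== PRECONDITION & SPEC =====
-- first-match lookup in a booking's association list (the Python dict access dic[k])
def pvKey (dic : List (String × String)) (k : String) : Option String :=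
  (dic.find? (fun p => p.1 == k)).map (·.2)

def pvPreStarts : List String := ["8:30", "9:00", "9:30", "10:00", "10:30", "11:00", "11:30", "12:00", "12:30", "13:00", "13:30", "14:00", "14:30", "15:00", "15:30", "16:00", "16:30", "17:00", "17:30", "18:00", "18:30", "19:00", "19:30", "20:00", "20:30"]
def pvPreEnds : List String := ["8:20", "8:50", "9:20", "9:50", "10:20", "10:50", "11:20", "11:50", "12:20", "12:50", "13:20", "13:50", "14:20", "14:50", "15:20", "15:50", "16:20", "16:50", "17:20", "17:50", "18:20", "18:50", "19:20", "19:50", "20:20"]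

-- Pre_ excludes exactly the inputs on which Python A raises KeyError: a booking without 'days', a
-- day-matching booking without 'startTime' or 'endTime', or a day-matching booking occupying at
-- least one time slot without 'buildingCode' or 'roomNumber'.
def Pre_bookings_by_day (two_letter_weekday : String) (biglist : List (List (String × String))) : Prop :=
  ∀ dic ∈ biglist,
    (pvKey dic "days").isSome = true ∧
    (pvKey dic "days" = some two_letter_weekday →
      (pvKey dic "startTime").isSome = true ∧ (pvKey dic "endTime").isSome = true ∧
      (∀ i ∈ List.idxOf? ((pvKey dic "startTime").getD "") pvPreStarts,
       ∀ j ∈ List.idxOf? ((pvKey dic "endTime").getD "") pvPreEnds,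
        i < j → (pvKey dic "buildingCode").isSome = true ∧ (pvKey dic "roomNumber").isSome = true))

instance (two_letter_weekday : String) (biglist : List (List (String × String))) : Decidable (Pre_bookings_by_day two_letter_weekday biglist) := by unfold Pre_bookings_by_day; infer_instance

def pvWitness_bookings_by_day : String × (List (List (String × String))) :=
  ("Mo", [[("days", "Mo"), ("startTime", "8:30"), ("endTime", "9:50"), ("buildingCode", "ML"), ("roomNumber", "101")]])

def Spec_bookings_by_day (two_letter_weekday : String) (biglist : List (List (String × String))) (out : List (String × List String)) : Prop := out = bookings_by_day_alt two_letter_weekday biglist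
instance (two_letter_weekday : String) (biglist : List (List (String × String))) (out : List (String × List String)) : Decidable (Spec_bookings_by_day two_letter_weekday biglist out) := by unfold Spec_bookings_by_day; infer_instance

-- ===== CLAIM (what is proved, stated in full; the proofs are below) =====
def Claim_equal_bookings_by_day : Prop := ∀ (two_letter_weekday : String) (biglist : List (List (String × String))), Dom_bookings_by_day two_letter_weekday biglist → Pre_bookings_by_day two_letter_weekday biglist → Spec_bookings_by_day two_letter_weekday biglist (bookings_by_day two_letter_weekday biglist)

-- ===== LEMMAS AND PROOFS =====

-- per-booking contribution of one booking to slot i, read off A's code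
def perA (wd : String) (i : Nat) (dic : List (String × String)) : List String :=
  if (PySem.Dict.mk dic).getD "days" "" == wd then
    match scanIdx? ((PySem.Dict.mk dic).getD "endTime" "") lendA with
    | some j =>
        if scanIdx ((PySem.Dict.mk dic).getD "startTime" "") lstartA ≤ i ∧ i < j then
          [(PySem.Dict.mk dic).getD "buildingCode" "" ++ " " ++ (PySem.Dict.mk dic).getD "roomNumber" ""]
        else []
    | none => []
  else []

-- the same contribution read off B's comprehension condition
def perB (wd : String) (i : Int) (dic : List (String × String)) : List String :=
  if (PySem.Dict.mk dic).getD "days" "" == wd then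
    match sidxB.get? ((PySem.Dict.mk dic).getD "startTime" ""), eidxB.get? ((PySem.Dict.mk dic).getD "endTime" "") with
    | some si, some ei =>
        if si ≤ i ∧ i < ei then
          [(PySem.Dict.mk dic).getD "buildingCode" "" ++ " " ++ (PySem.Dict.mk dic).getD "roomNumber" ""]
        else []
    | _, _ => []
  else []

theorem scanIdx?_lt_length (t : String) : ∀ l, ∀ j, scanIdx? t l = some j → j < l.length := by
  intro l
  induction l with
  | nil => intro j h; simp [scanIdx?] at h
  | cons x xs ih =>
      intro j h
      simp only [scanIdx?] at h
      split at h
      · simp at h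
        simp [← h]
      · cases hx : scanIdx? t xs with
        | none => rw [hx] at h; simp at h
        | some k =>
            rw [hx] at h
            simp only [Option.map_some, Option.some.injEq] at h
            have := ih k hx
            simp; omega

theorem slotA_inj : ∀ a < 25, ∀ b < 25, lstartA.getD a "" = lstartA.getD b "" → a = b := by decide

theorem slotA_mem : ∀ a < 24, lstartA.getD a "" ∈ lstartA.take 24 := by decide

theorem fill_getD (code : String) (i : Nat) (hi : i < 24) :
    ∀ n c, (c + n ≤ 24 ∨ n = 0) → ∀ d : PySem.Dict String (List String),
      ((List.range' c n).foldl (fun d idx => d.modify (lstartA.getD idx "") [] (· ++ [code])) d).getD (lstartA.getD i "") []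
        = d.getD (lstartA.getD i "") [] ++ (if c ≤ i ∧ i < c + n then [code] else []) := by
  intro n
  induction n with
  | zero => intro c _ d; simp
  | succ n ih =>
      intro c hc d
      rcases hc with hc | hc
      · simp only [List.range', List.foldl_cons]
        rw [ih (c + 1) (by omega)]
        rw [PySem.Dict.getD_modify]
        by_cases he : i = c
        · subst he
          rw [if_pos rfl, if_neg (by omega), if_pos (by omega)]
          simp
        · have hne : lstartA.getD i "" ≠ lstartA.getD c "" :=
            fun h => he (slotA_inj i (by omega) c (by omega) h)
          rw [if_neg hne]
          have hiff : (c + 1 ≤ i ∧ i < c + 1 + n) ↔ (c ≤ i ∧ i < c + (n + 1)) := by omega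
          rw [if_congr hiff rfl rfl]
      · omega

theorem step_getD (wd : String) (dic : List (String × String)) (d : PySem.Dict String (List String))
    (i : Nat) (hi : i < 24) :
    (stepA wd d dic).getD (lstartA.getD i "") [] = d.getD (lstartA.getD i "") [] ++ perA wd i dic := by
  unfold stepA perA
  split
  · cases h : scanIdx? ((PySem.Dict.mk dic).getD "endTime" "") lendA with
    | none => simp [h]
    | some j =>
        simp only [h]
        have hj : j < 25 := by
          have := scanIdx?_lt_length _ lendA j h
          simpa [lendA] using this
        unfold fillA
        rw [fill_getD _ i hi _ _ (by omega)]
        have hiff : (scanIdx ((PySem.Dict.mk dic).getD "startTime" "") lstartA ≤ i ∧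
            i < scanIdx ((PySem.Dict.mk dic).getD "startTime" "") lstartA +
              (j - scanIdx ((PySem.Dict.mk dic).getD "startTime" "") lstartA)) ↔
            (scanIdx ((PySem.Dict.mk dic).getD "startTime" "") lstartA ≤ i ∧ i < j) := by omega
        rw [if_congr hiff rfl rfl]
  · simp

theorem foldA_getD (wd : String) (i : Nat) (hi : i < 24) :
    ∀ (l : List (List (String × String))) (d : PySem.Dict String (List String)),
      (l.foldl (stepA wd) d).getD (lstartA.getD i "") []
        = d.getD (lstartA.getD i "") [] ++ l.flatMap (perA wd i) := by
  intro l
  induction l with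
  | nil => intro d; simp
  | cons dic rest ih =>
      intro d
      simp only [List.foldl_cons, List.flatMap_cons]
      rw [ih, step_getD wd dic d i hi, List.append_assoc]

theorem fill_keys (code : String) :
    ∀ n c, (c + n ≤ 24 ∨ n = 0) → ∀ d : PySem.Dict String (List String), d.keys = lstartA.take 24 →
      ((List.range' c n).foldl (fun d idx => d.modify (lstartA.getD idx "") [] (· ++ [code])) d).keys = lstartA.take 24 := by
  intro n
  induction n with
  | zero => intro c _ d hd; simpa using hd
  | succ n ih =>
      intro c hc d hd
      rcases hc with hc | hc
      · simp only [List.range', List.foldl_cons]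
        apply ih (c + 1) (by omega)
        have hmem : lstartA.getD c "" ∈ d.keys := by rw [hd]; exact slotA_mem c (by omega)
        have hcont : d.contains (lstartA.getD c "") = true := by
          rw [PySem.Dict.contains_eq_decide_mem_keys]; exact decide_eq_true hmem
        rw [PySem.Dict.keys_modify, PySem.Dict.keys_insert_of_contains _ _ hcont, hd]
      · omega

theorem foldA_keys (wd : String) :
    ∀ (l : List (List (String × String))) (d : PySem.Dict String (List String)), d.keys = lstartA.take 24 →
      (l.foldl (stepA wd) d).keys = lstartA.take 24 := by
  intro l
  induction l with
  | nil => intro d hd; simpa using hd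
  | cons dic rest ih =>
      intro d hd
      simp only [List.foldl_cons]
      apply ih
      unfold stepA
      split
      · cases h : scanIdx? ((PySem.Dict.mk dic).getD "endTime" "") lendA with
        | none => simpa using hd
        | some j =>
            simp only [h]
            have hj : j < 25 := by
              have := scanIdx?_lt_length _ lendA j h
              simpa [lendA] using this
            unfold fillA
            exact fill_keys _ _ _ (by omega) d hd
      · simpa using hd

theorem sidx_get (t : String) :
    sidxB.get? t = if scanIdx t lstartA < 25 then some ((scanIdx t lstartA : Nat) : Int) else none := by
  by_cases h0 : t = "8:30"
  · subst h0; decide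
  by_cases h1 : t = "9:00"
  · subst h1; decide
  by_cases h2 : t = "9:30"
  · subst h2; decide
  by_cases h3 : t = "10:00"
  · subst h3; decide
  by_cases h4 : t = "10:30"
  · subst h4; decide
  by_cases h5 : t = "11:00"
  · subst h5; decide
  by_cases h6 : t = "11:30"
  · subst h6; decide
  by_cases h7 : t = "12:00"
  · subst h7; decide
  by_cases h8 : t = "12:30"
  · subst h8; decide
  by_cases h9 : t = "13:00"
  · subst h9; decide
  by_cases h10 : t = "13:30"
  · subst h10; decide
  by_cases h11 : t = "14:00"
  · subst h11; decide
  by_cases h12 : t = "14:30"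
  · subst h12; decide
  by_cases h13 : t = "15:00"
  · subst h13; decide
  by_cases h14 : t = "15:30"
  · subst h14; decide
  by_cases h15 : t = "16:00"
  · subst h15; decide
  by_cases h16 : t = "16:30"
  · subst h16; decide
  by_cases h17 : t = "17:00"
  · subst h17; decide
  by_cases h18 : t = "17:30"
  · subst h18; decide
  by_cases h19 : t = "18:00"
  · subst h19; decide
  by_cases h20 : t = "18:30"
  · subst h20; decide
  by_cases h21 : t = "19:00"
  · subst h21; decide
  by_cases h22 : t = "19:30"
  · subst h22; decide
  by_cases h23 : t = "20:00"
  · subst h23; decide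
  by_cases h24 : t = "20:30"
  · subst h24; decide
  have hmk : sidxB = PySem.Dict.mk [("8:30", (0 : Int)), ("9:00", (1 : Int)), ("9:30", (2 : Int)), ("10:00", (3 : Int)), ("10:30", (4 : Int)), ("11:00", (5 : Int)), ("11:30", (6 : Int)), ("12:00", (7 : Int)), ("12:30", (8 : Int)), ("13:00", (9 : Int)), ("13:30", (10 : Int)), ("14:00", (11 : Int)), ("14:30", (12 : Int)), ("15:00", (13 : Int)), ("15:30", (14 : Int)), ("16:00", (15 : Int)), ("16:30", (16 : Int)), ("17:00", (17 : Int)), ("17:30", (18 : Int)), ("18:00", (19 : Int)), ("18:30", (20 : Int)), ("19:00", (21 : Int)), ("19:30", (22 : Int)), ("20:00", (23 : Int)), ("20:30", (24 : Int))] := by decide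
  rw [hmk]
  simp [PySem.Dict.get?_mk_cons, PySem.Dict.get?, scanIdx, lstartA, Ne.symm h0, Ne.symm h1, Ne.symm h2, Ne.symm h3, Ne.symm h4, Ne.symm h5, Ne.symm h6, Ne.symm h7, Ne.symm h8, Ne.symm h9, Ne.symm h10, Ne.symm h11, Ne.symm h12, Ne.symm h13, Ne.symm h14, Ne.symm h15, Ne.symm h16, Ne.symm h17, Ne.symm h18, Ne.symm h19, Ne.symm h20, Ne.symm h21, Ne.symm h22, Ne.symm h23, Ne.symm h24, h0, h1, h2, h3, h4, h5, h6, h7, h8, h9, h10, h11, h12, h13, h14, h15, h16, h17, h18, h19, h20, h21, h22, h23, h24]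

theorem eidx_get (t : String) :
    eidxB.get? t = (scanIdx? t lendA).map (fun j => (j : Int)) := by
  by_cases h0 : t = "8:20"
  · subst h0; decide
  by_cases h1 : t = "8:50"
  · subst h1; decide
  by_cases h2 : t = "9:20"
  · subst h2; decide
  by_cases h3 : t = "9:50"
  · subst h3; decide
  by_cases h4 : t = "10:20"
  · subst h4; decide
  by_cases h5 : t = "10:50"
  · subst h5; decide
  by_cases h6 : t = "11:20"
  · subst h6; decide
  by_cases h7 : t = "11:50"
  · subst h7; decide
  by_cases h8 : t = "12:20"
  · subst h8; decide
  by_cases h9 : t = "12:50"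
  · subst h9; decide
  by_cases h10 : t = "13:20"
  · subst h10; decide
  by_cases h11 : t = "13:50"
  · subst h11; decide
  by_cases h12 : t = "14:20"
  · subst h12; decide
  by_cases h13 : t = "14:50"
  · subst h13; decide
  by_cases h14 : t = "15:20"
  · subst h14; decide
  by_cases h15 : t = "15:50"
  · subst h15; decide
  by_cases h16 : t = "16:20"
  · subst h16; decide
  by_cases h17 : t = "16:50"
  · subst h17; decide
  by_cases h18 : t = "17:20"
  · subst h18; decide
  by_cases h19 : t = "17:50"
  · subst h19; decide
  by_cases h20 : t = "18:20"
  · subst h20; decide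
  by_cases h21 : t = "18:50"
  · subst h21; decide
  by_cases h22 : t = "19:20"
  · subst h22; decide
  by_cases h23 : t = "19:50"
  · subst h23; decide
  by_cases h24 : t = "20:20"
  · subst h24; decide
  have hmk : eidxB = PySem.Dict.mk [("8:20", (0 : Int)), ("8:50", (1 : Int)), ("9:20", (2 : Int)), ("9:50", (3 : Int)), ("10:20", (4 : Int)), ("10:50", (5 : Int)), ("11:20", (6 : Int)), ("11:50", (7 : Int)), ("12:20", (8 : Int)), ("12:50", (9 : Int)), ("13:20", (10 : Int)), ("13:50", (11 : Int)), ("14:20", (12 : Int)), ("14:50", (13 : Int)), ("15:20", (14 : Int)), ("15:50", (15 : Int)), ("16:20", (16 : Int)), ("16:50", (17 : Int)), ("17:20", (18 : Int)), ("17:50", (19 : Int)), ("18:20", (20 : Int)), ("18:50", (21 : Int)), ("19:20", (22 : Int)), ("19:50", (23 : Int)), ("20:20", (24 : Int))] := by decide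
  rw [hmk]
  simp [PySem.Dict.get?_mk_cons, PySem.Dict.get?, scanIdx?, lendA, Ne.symm h0, Ne.symm h1, Ne.symm h2, Ne.symm h3, Ne.symm h4, Ne.symm h5, Ne.symm h6, Ne.symm h7, Ne.symm h8, Ne.symm h9, Ne.symm h10, Ne.symm h11, Ne.symm h12, Ne.symm h13, Ne.symm h14, Ne.symm h15, Ne.symm h16, Ne.symm h17, Ne.symm h18, Ne.symm h19, Ne.symm h20, Ne.symm h21, Ne.symm h22, Ne.symm h23, Ne.symm h24, h0, h1, h2, h3, h4, h5, h6, h7, h8, h9, h10, h11, h12, h13, h14, h15, h16, h17, h18, h19, h20, h21, h22, h23, h24]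

theorem perB_eq_perA (wd : String) (i : Nat) (hi : i < 24) (dic : List (String × String)) :
    perB wd (i : Int) dic = perA wd i dic := by
  unfold perA perB
  split
  · cases h : scanIdx? ((PySem.Dict.mk dic).getD "endTime" "") lendA with
    | none =>
        rw [sidx_get, eidx_get, h]
        by_cases hc : scanIdx ((PySem.Dict.mk dic).getD "startTime" "") lstartA < 25
        · rw [if_pos hc]; rfl
        · rw [if_neg hc]
    | some j =>
        rw [sidx_get, eidx_get, h]
        by_cases hc : scanIdx ((PySem.Dict.mk dic).getD "startTime" "") lstartA < 25
        · rw [if_pos hc]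
          have hiff : (((scanIdx ((PySem.Dict.mk dic).getD "startTime" "") lstartA : Nat) : Int) ≤ (i : Int) ∧
              (i : Int) < ((j : Nat) : Int)) ↔
              (scanIdx ((PySem.Dict.mk dic).getD "startTime" "") lstartA ≤ i ∧ i < j) := by omega
          show (if ((scanIdx ((PySem.Dict.mk dic).getD "startTime" "") lstartA : Nat) : Int) ≤ (i : Int) ∧
              (i : Int) < ((j : Nat) : Int) then
                [(PySem.Dict.mk dic).getD "buildingCode" "" ++ " " ++ (PySem.Dict.mk dic).getD "roomNumber" ""]
              else []) = _
          rw [if_congr hiff rfl rfl]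
        · rw [if_neg hc]
          show ([] : List String) =
            (if scanIdx ((PySem.Dict.mk dic).getD "startTime" "") lstartA ≤ i ∧ i < j then
              [(PySem.Dict.mk dic).getD "buildingCode" "" ++ " " ++ (PySem.Dict.mk dic).getD "roomNumber" ""] else [])
          rw [if_neg (by omega)]
  · rfl

theorem occB_eq (wd : String) (bl : List (List (String × String))) (i : Nat) (hi : i < 24) :
    occB wd bl (i : Int) = bl.flatMap (perA wd i) := by
  unfold occB
  have hf : (fun (acc : List String) dic =>
      if (PySem.Dict.mk dic).getD "days" "" == wd then
        match sidxB.get? ((PySem.Dict.mk dic).getD "startTime" ""), eidxB.get? ((PySem.Dict.mk dic).getD "endTime" "") with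
        | some si, some ei =>
            if si ≤ (i : Int) ∧ (i : Int) < ei then
              acc ++ [(PySem.Dict.mk dic).getD "buildingCode" "" ++ " " ++ (PySem.Dict.mk dic).getD "roomNumber" ""]
            else acc
        | _, _ => acc
      else acc) = fun acc dic => acc ++ perB wd (i : Int) dic := by
    funext acc dic
    unfold perB
    split
    · cases hs : sidxB.get? ((PySem.Dict.mk dic).getD "startTime" "") with
      | none => simp
      | some si =>
          cases he : eidxB.get? ((PySem.Dict.mk dic).getD "endTime" "") with
          | none => simp
          | some ei =>
              show (if si ≤ (i : Int) ∧ (i : Int) < ei then acc ++ [(PySem.Dict.mk dic).getD "buildingCode" "" ++ " " ++ (PySem.Dict.mk dic).getD "roomNumber" ""] else acc) =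
                  acc ++ (if si ≤ (i : Int) ∧ (i : Int) < ei then [(PySem.Dict.mk dic).getD "buildingCode" "" ++ " " ++ (PySem.Dict.mk dic).getD "roomNumber" ""] else [])
              split <;> simp
    · simp
  rw [hf]
  rw [PySem.List.foldl_append_eq_flatMap (perB wd (i : Int)) bl []]
  simp only [List.nil_append]
  exact List.flatMap_congr (fun dic _ => perB_eq_perA wd i hi dic)

-- ===== VERDICT (by name: the statement is the Claim_ definition above) =====
theorem bookings_by_day_spec : Claim_equal_bookings_by_day := by
  intro wd bl _ _
  unfold Spec_bookings_by_day bookings_by_day bookings_by_day_alt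
  have hkeys : (bl.foldl (stepA wd) initA).keys = lstartA.take 24 :=
    foldA_keys wd bl initA (by decide)
  have hnd : (bl.foldl (stepA wd) initA).keys.Nodup := by rw [hkeys]; decide
  rw [PySem.Dict.items_eq_map_keys _ hnd ([] : List String), hkeys]
  rw [PySem.Dict.items_foldl_insert_fresh (PySem.List.enumerate (lstartB.take 24) 0)
        Prod.snd (fun p => occB wd bl p.1) PySem.Dict.empty (fun a _ => rfl) (by decide)]
  rw [show (PySem.Dict.empty : PySem.Dict String (List String)).items = [] from rfl, List.nil_append]
  apply List.ext_getElem
  · simp only [List.length_map, PySem.List.length_enumerate]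
    decide
  · intro n h1 h2
    have hn : n < 24 := by
      simp only [List.length_map] at h1
      have hlen : (List.take 24 lstartA).length = 24 := by decide
      omega
    simp only [List.getElem_map, PySem.List.getElem_enumerate]
    have hsl : ∀ (h : n < (List.take 24 lstartA).length),
        (List.take 24 lstartA)[n]'h = lstartA.getD n "" := by
      intro h
      rw [List.getElem_take]
      exact (List.getD_eq_getElem lstartA "" (by simp only [List.length_take] at h; omega)).symm
    simp only [Prod.mk.injEq]
    constructor
    · rfl
    · rw [hsl]
      rw [foldA_getD wd n hn bl initA]
      have hinit : ∀ m < 24, initA.getD (lstartA.getD m "") [] = [] := by decide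
      rw [hinit n hn, List.nil_append, zero_add, occB_eq wd bl n hn]
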